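-- pv_equiv track=rewrite | github.com/xthecapx/qiskit-qward | qward/metrics/qc_understandability_metrics.py | _count_other_single_qubit_gates
-- ===== SOURCE A (Python) =====
-- from typing import Dict, Set, Any, List, Tuple
--
-- SINGLE_QUBIT_GATES = {
--     "x", "y", "z", "h", "s", "sdg", "t", "tdg",
--     "rx", "ry", "rz", "u1", "u2", "u3", "p", "u",
--     "sx", "sxdg", "rzx", "phase", "reset"
-- }
--
-- PAULI_GATES = {"x", "y", "z"}
--
-- def _count_other_single_qubit_gates(gate_counts: Dict[str, int]) -> int:
--     """
--     Count other single-qubit gates (excluding Pauli and Hadamard).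
--
--     Args:
--         gate_counts: Dictionary of gate counts
--
--     Returns:
--         int: Number of other single-qubit gates
--     """
--     other_single_qubit = 0
--
--     for gate_name, count in gate_counts.items():
--         if (gate_name in SINGLE_QUBIT_GATES and
--             gate_name not in PAULI_GATES and
--             gate_name != "h"):
--             other_single_qubit += count
--
--     return other_single_qubit
-- ===== SOURCE B (Python) =====
-- # B: iterate over the fixed target-gate set and sum direct dict lookups,
-- # instead of scanning the input dict and filtering each entry.
-- SINGLE_QUBIT_GATES = {
--     "x", "y", "z", "h", "s", "sdg", "t", "tdg",
--     "rx", "ry", "rz", "u1", "u2", "u3", "p", "u",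
--     "sx", "sxdg", "rzx", "phase", "reset"
-- }
--
-- PAULI_GATES = {"x", "y", "z"}
--
-- OTHER_SINGLE_QUBIT_GATES = (SINGLE_QUBIT_GATES - PAULI_GATES) - {"h"}
--
-- def _count_other_single_qubit_gates(gate_counts):
--     return sum(gate_counts.get(g, 0) for g in OTHER_SINGLE_QUBIT_GATES)
-- ===== Notes on version B (the rewrite author's own statement) =====
-- stated objective: alternative
-- what changed: B loops over the fixed 17-element target set OTHER = SINGLE_QUBIT_GATES - PAULI_GATES - {'h'} and sums gate_counts.get(g, 0), instead of A's scan of all dict entries with a three-part membership filter per entry.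
import Mathlib
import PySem

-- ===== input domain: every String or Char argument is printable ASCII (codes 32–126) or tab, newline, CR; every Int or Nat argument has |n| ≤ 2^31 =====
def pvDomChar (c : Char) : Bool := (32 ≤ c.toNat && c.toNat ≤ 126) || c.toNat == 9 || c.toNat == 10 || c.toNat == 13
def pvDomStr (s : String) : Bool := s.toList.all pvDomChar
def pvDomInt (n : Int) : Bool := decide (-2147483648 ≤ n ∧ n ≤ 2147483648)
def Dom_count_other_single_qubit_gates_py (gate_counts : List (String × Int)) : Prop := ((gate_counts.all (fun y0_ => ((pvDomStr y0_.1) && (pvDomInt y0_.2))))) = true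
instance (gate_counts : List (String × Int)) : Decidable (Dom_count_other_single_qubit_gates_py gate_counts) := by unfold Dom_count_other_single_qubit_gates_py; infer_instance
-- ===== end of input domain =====

-- B iterates the fixed set OTHER = SINGLE_QUBIT_GATES - PAULI_GATES - {"h"} and sums direct lookups,
-- instead of A's scan over all dict entries with a per-entry membership filter (objective: alternative).


-- ===== PORT A =====
def SINGLE_QUBIT_GATES : PySem.Set String :=
  PySem.Set.ofList ["x","y","z","h","s","sdg","t","tdg","rx","ry","rz","u1","u2","u3","p","u","sx","sxdg","rzx","phase","reset"]

def PAULI_GATES : PySem.Set String := PySem.Set.ofList ["x","y","z"]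

-- for gate_name, count in gate_counts.items(): if …: other_single_qubit += count
def count_other_single_qubit_gates_py (gate_counts : List (String × Int)) : Int :=
  gate_counts.foldl
    (fun other_single_qubit p =>
      if (PySem.Set.contains SINGLE_QUBIT_GATES p.1 && !PySem.Set.contains PAULI_GATES p.1 && p.1 != "h") then
        other_single_qubit + p.2
      else other_single_qubit)
    0

-- ===== PORT B =====
-- OTHER_SINGLE_QUBIT_GATES = (SINGLE_QUBIT_GATES - PAULI_GATES) - {"h"}
def OTHER_SINGLE_QUBIT_GATES : PySem.Set String :=
  PySem.Set.diff (PySem.Set.diff SINGLE_QUBIT_GATES PAULI_GATES) (PySem.Set.ofList ["h"])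

-- gate_counts.get(g, 0) on the assoc-list dict: first match, default 0 (exact for a dict: keys are unique)
def pvGetD0 (gate_counts : List (String × Int)) (g : String) : Int :=
  match gate_counts.find? (fun p => p.1 == g) with
  | some p => p.2
  | none => 0

-- sum(gate_counts.get(g, 0) for g in OTHER_SINGLE_QUBIT_GATES)
def count_other_single_qubit_gates_py_alt (gate_counts : List (String × Int)) : Int :=
  ((OTHER_SINGLE_QUBIT_GATES : List String).map (fun g => pvGetD0 gate_counts g)).sum

-- ===== PRECONDITION & SPEC =====
-- Pre_ excludes association lists with duplicate keys: they do not represent any Python dict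
-- (the Python argument is a dict, whose keys are necessarily distinct).
def Pre_count_other_single_qubit_gates_py (gate_counts : List (String × Int)) : Prop :=
  (gate_counts.map Prod.fst).Nodup
instance (gate_counts : List (String × Int)) : Decidable (Pre_count_other_single_qubit_gates_py gate_counts) := by
  unfold Pre_count_other_single_qubit_gates_py; infer_instance

def pvWitness_count_other_single_qubit_gates_py : (List (String × Int)) := [("h", 3), ("t", 2), ("cx", 7)]

def Spec_count_other_single_qubit_gates_py (gate_counts : List (String × Int)) (out : Int) : Prop := out = count_other_single_qubit_gates_py_alt gate_counts
instance (gate_counts : List (String × Int)) (out : Int) : Decidable (Spec_count_other_single_qubit_gates_py gate_counts out) := by unfold Spec_count_other_single_qubit_gates_py; infer_instance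

-- ===== CLAIM (what is proved, stated in full; the proofs are below) =====
def Claim_equal_count_other_single_qubit_gates_py : Prop := ∀ (gate_counts : List (String × Int)), Dom_count_other_single_qubit_gates_py gate_counts → Pre_count_other_single_qubit_gates_py gate_counts → Spec_count_other_single_qubit_gates_py gate_counts (count_other_single_qubit_gates_py gate_counts)

-- ===== LEMMAS AND PROOFS =====

theorem pvSQG_lit : (SINGLE_QUBIT_GATES : List String) =
    ["x","y","z","h","s","sdg","t","tdg","rx","ry","rz","u1","u2","u3","p","u","sx","sxdg","rzx","phase","reset"] := by decide

theorem pvOTH_lit : (OTHER_SINGLE_QUBIT_GATES : List String) =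
    ["s","sdg","t","tdg","rx","ry","rz","u1","u2","u3","p","u","sx","sxdg","rzx","phase","reset"] := by decide

-- membership in the precomputed OTHER set ↔ A's three-part filter
theorem pvMemOther (k : String) :
    k ∈ (OTHER_SINGLE_QUBIT_GATES : List String) ↔
      (PySem.Set.contains SINGLE_QUBIT_GATES k && !PySem.Set.contains PAULI_GATES k && k != "h") = true := by
  by_cases hs : k ∈ (SINGLE_QUBIT_GATES : List String)
  · rw [pvSQG_lit] at hs
    simp only [List.mem_cons, List.not_mem_nil, or_false] at hs
    rcases hs with rfl|rfl|rfl|rfl|rfl|rfl|rfl|rfl|rfl|rfl|rfl|rfl|rfl|rfl|rfl|rfl|rfl|rfl|rfl|rfl|rfl <;> decide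
  · constructor
    · intro hm; rw [pvOTH_lit] at hm; exfalso
      simp only [List.mem_cons, List.not_mem_nil, or_false] at hm
      rcases hm with rfl|rfl|rfl|rfl|rfl|rfl|rfl|rfl|rfl|rfl|rfl|rfl|rfl|rfl|rfl|rfl|rfl <;>
        exact hs (by rw [pvSQG_lit]; decide)
    · intro hb; exfalso
      simp only [Bool.and_eq_true] at hb
      exact hs (by simpa [PySem.Set.contains] using hb.1.1)

theorem pvGetD0_cons (k : String) (v : Int) (rest : List (String × Int)) (g : String) :
    pvGetD0 ((k, v) :: rest) g = if g = k then v else pvGetD0 rest g := by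
  by_cases h : g = k
  · subst h; simp [pvGetD0, List.find?]
  · have hb : (k == g) = false := by
      simp only [beq_eq_false_iff_ne]; exact fun e => h e.symm
    simp [pvGetD0, List.find?, hb, h]

theorem pvGetD0_not_mem (gc : List (String × Int)) (k : String) (h : k ∉ gc.map Prod.fst) :
    pvGetD0 gc k = 0 := by
  induction gc with
  | nil => rfl
  | cons p rest ih =>
      simp only [List.map_cons, List.mem_cons] at h
      push Not at h
      cases p with | mk a b =>
      rw [pvGetD0_cons]
      simp only [if_neg h.1]
      exact ih h.2

-- summing a function updated at one fresh point over a duplicate-free list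
theorem pvSumUpdate (l : List String) (hl : l.Nodup) (f : String → Int) (k : String) (v : Int)
    (hk : f k = 0) :
    (l.map (fun g => if g = k then v else f g)).sum = (if k ∈ l then v else 0) + (l.map f).sum := by
  induction l with
  | nil => simp
  | cons a rest ih =>
      rcases List.nodup_cons.mp hl with ⟨ha, hrest⟩
      by_cases hak : a = k
      · subst hak
        have : rest.map (fun g => if g = a then v else f g) = rest.map f :=
          List.map_congr_left (fun g hg => by
            have : g ≠ a := fun e => ha (e ▸ hg)
            simp [this])
        simp [this, hk]
      · simp only [List.map_cons, List.sum_cons, List.mem_cons, if_neg hak, ih hrest]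
        have : ¬ (k = a) := fun e => hak e.symm
        by_cases hm : k ∈ rest <;> simp [hm, this] <;> ring

-- A's filtering fold is the sum of a per-entry contribution
theorem pvA_sum (gc : List (String × Int)) :
    count_other_single_qubit_gates_py gc
      = (gc.map (fun p =>
          if (PySem.Set.contains SINGLE_QUBIT_GATES p.1 && !PySem.Set.contains PAULI_GATES p.1 && p.1 != "h") then
            p.2
          else 0)).sum := by
  unfold count_other_single_qubit_gates_py
  have hfun : (fun (o : Int) (p : String × Int) =>
      if (PySem.Set.contains SINGLE_QUBIT_GATES p.1 && !PySem.Set.contains PAULI_GATES p.1 && p.1 != "h") then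
        o + p.2
      else o)
    = (fun (o : Int) (p : String × Int) =>
      o + (if (PySem.Set.contains SINGLE_QUBIT_GATES p.1 && !PySem.Set.contains PAULI_GATES p.1 && p.1 != "h") then
        p.2
      else 0)) := by
    funext o p; split_ifs <;> ring
  rw [hfun, PySem.List.foldl_add]
  simp

theorem pvMain (gc : List (String × Int)) (h : (gc.map Prod.fst).Nodup) :
    count_other_single_qubit_gates_py gc = count_other_single_qubit_gates_py_alt gc := by
  induction gc with
  | nil => decide
  | cons p rest ih =>
      cases p with | mk k v =>
      simp only [List.map_cons, List.nodup_cons] at h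
      -- A side
      have hA : count_other_single_qubit_gates_py ((k, v) :: rest)
          = (if (PySem.Set.contains SINGLE_QUBIT_GATES k && !PySem.Set.contains PAULI_GATES k && k != "h") then v else 0)
            + count_other_single_qubit_gates_py rest := by
        rw [pvA_sum, pvA_sum]
        simp only [List.map_cons, List.sum_cons]
      -- B side
      have hB : count_other_single_qubit_gates_py_alt ((k, v) :: rest)
          = (if k ∈ (OTHER_SINGLE_QUBIT_GATES : List String) then v else 0)
            + count_other_single_qubit_gates_py_alt rest := by
        unfold count_other_single_qubit_gates_py_alt
        have hmap : (OTHER_SINGLE_QUBIT_GATES : List String).map (fun g => pvGetD0 ((k, v) :: rest) g)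
            = (OTHER_SINGLE_QUBIT_GATES : List String).map (fun g => if g = k then v else pvGetD0 rest g) :=
          List.map_congr_left (fun g _ => pvGetD0_cons k v rest g)
        rw [hmap,
          pvSumUpdate (OTHER_SINGLE_QUBIT_GATES : List String)
            (by rw [pvOTH_lit]; decide) (fun g => pvGetD0 rest g) k v
            (pvGetD0_not_mem rest k h.1)]
      rw [hA, hB, ih h.2]
      congr 1
      by_cases hm : k ∈ (OTHER_SINGLE_QUBIT_GATES : List String)
      · rw [if_pos hm, if_pos ((pvMemOther k).mp hm)]
      · rw [if_neg hm, if_neg (fun hb => hm ((pvMemOther k).mpr hb))]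

-- ===== VERDICT (by name: the statement is the Claim_ definition above) =====
theorem count_other_single_qubit_gates_py_spec : Claim_equal_count_other_single_qubit_gates_py := by
  intro gc _ hpre
  unfold Spec_count_other_single_qubit_gates_py
  exact pvMain gc hpre
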